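-- pv_equiv track=rewrite | github.com/dief/advent | 2023-12/day1/calibration.py | parse_num
-- ===== SOURCE A (Python) =====
-- number_strs = ["zero", "one", "two", "three", "four", "five", "six", "seven",
--                 "eight", "nine"]
--
-- def parse_num(i, c, line):
--     if c.isdigit():
--         return int(c)
--     num = 0
--     for num_str in number_strs:
--         if line[i:].startswith(num_str):
--             return num
--         num += 1
--     return -1
-- ===== SOURCE B (Python) =====
-- NUM_WORDS = {"zero": 0, "one": 1, "two": 2, "three": 3, "four": 4,
--              "five": 5, "six": 6, "seven": 7, "eight": 8, "nine": 9}
-- WORD_LENS = (3, 4, 5)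
--
-- def parse_num(i, c, line):
--     if c.isdigit():
--         return int(c)
--     tail = line[i:]
--     for length in WORD_LENS:
--         value = NUM_WORDS.get(tail[:length])
--         if value is not None:
--             return value
--     return -1
-- ===== Notes on version B (the rewrite author's own statement) =====
-- stated objective: alternative
-- what changed: Replaces A's ordered scan over the ten spelled-out words (one startswith test per word, tracking a counter) with a word->value dict built once and one table lookup of line[i:i+L] per distinct word length (3, 4, 5).
import Mathlib
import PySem

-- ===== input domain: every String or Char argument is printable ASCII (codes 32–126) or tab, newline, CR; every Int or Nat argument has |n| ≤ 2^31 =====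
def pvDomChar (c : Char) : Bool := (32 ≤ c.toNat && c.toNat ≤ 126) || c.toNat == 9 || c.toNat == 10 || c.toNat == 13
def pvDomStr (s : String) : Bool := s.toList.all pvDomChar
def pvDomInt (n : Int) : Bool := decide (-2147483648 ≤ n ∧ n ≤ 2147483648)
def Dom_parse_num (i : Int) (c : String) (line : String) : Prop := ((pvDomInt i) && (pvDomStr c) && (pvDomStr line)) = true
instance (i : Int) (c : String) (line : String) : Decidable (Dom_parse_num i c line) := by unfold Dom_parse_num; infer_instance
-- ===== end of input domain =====

-- B replaces A's per-word startswith scan (10 prefix tests) with one dict lookup per distinct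
-- word length (3 table lookups of tail[:length]); a table-driven reshaping of the same pass.

-- ===== PORT A =====
def number_strs : List String :=
  ["zero", "one", "two", "three", "four", "five", "six", "seven", "eight", "nine"]

-- A's for-loop over number_strs with the running counter num
def pnLoop (tail : String) : List String → Int → Int
  | [], _ => -1
  | w :: ws, num => if PySem.Str.startswith tail w then num else pnLoop tail ws (num + 1)

def parse_num (i : Int) (c : String) (line : String) : Int :=
  if PySem.Str.strIsdigit c then (PySem.Int.ofStr? c).getD 0  -- int(c); on isdigit-true ASCII input ofStr? is always some
  else pnLoop (PySem.Str.slice line (some i) none) number_strs 0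

-- ===== PORT B =====
def numWords : PySem.Dict String Int :=
  PySem.Dict.ofList [("zero", 0), ("one", 1), ("two", 2), ("three", 3), ("four", 4),
                     ("five", 5), ("six", 6), ("seven", 7), ("eight", 8), ("nine", 9)]

def wordLens : List Int := [3, 4, 5]

-- B's for-loop over WORD_LENS: NUM_WORDS.get(tail[:length]), return it if not None else continue
def pnAltLoop (tail : String) : List Int → Int
  | [] => -1
  | L :: Ls => (numWords.get? (PySem.Str.slice tail none (some L))).getD (pnAltLoop tail Ls)

def parse_num_alt (i : Int) (c : String) (line : String) : Int :=
  if PySem.Str.strIsdigit c then (PySem.Int.ofStr? c).getD 0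
  else pnAltLoop (PySem.Str.slice line (some i) none) wordLens

-- ===== PRECONDITION & SPEC =====
def Spec_parse_num (i : Int) (c : String) (line : String) (out : Int) : Prop := out = parse_num_alt i c line
instance (i : Int) (c : String) (line : String) (out : Int) : Decidable (Spec_parse_num i c line out) := by unfold Spec_parse_num; infer_instance

-- ===== CLAIM (what is proved, stated in full; the proofs are below) =====
def Claim_equal_parse_num : Prop := ∀ (i : Int) (c : String) (line : String), Dom_parse_num i c line → Spec_parse_num i c line (parse_num i c line)

-- ===== LEMMAS AND PROOFS =====

-- A's chain of startswith tests over the char list t = tail.toList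
def Acore (t : List Char) : Int :=
  if t.take 4 = ['z','e','r','o'] then 0
  else if t.take 3 = ['o','n','e'] then 1
  else if t.take 3 = ['t','w','o'] then 2
  else if t.take 5 = ['t','h','r','e','e'] then 3
  else if t.take 4 = ['f','o','u','r'] then 4
  else if t.take 4 = ['f','i','v','e'] then 5
  else if t.take 3 = ['s','i','x'] then 6
  else if t.take 5 = ['s','e','v','e','n'] then 7
  else if t.take 5 = ['e','i','g','h','t'] then 8
  else if t.take 4 = ['n','i','n','e'] then 9
  else -1

-- B's three table lookups over t, each lookup unfolded into its ten key comparisons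
def Bcore (t : List Char) : Int :=
  if t.take 3 = ['z','e','r','o'] then 0
  else if t.take 3 = ['o','n','e'] then 1
  else if t.take 3 = ['t','w','o'] then 2
  else if t.take 3 = ['t','h','r','e','e'] then 3
  else if t.take 3 = ['f','o','u','r'] then 4
  else if t.take 3 = ['f','i','v','e'] then 5
  else if t.take 3 = ['s','i','x'] then 6
  else if t.take 3 = ['s','e','v','e','n'] then 7
  else if t.take 3 = ['e','i','g','h','t'] then 8
  else if t.take 3 = ['n','i','n','e'] then 9
  else if t.take 4 = ['z','e','r','o'] then 0
  else if t.take 4 = ['o','n','e'] then 1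
  else if t.take 4 = ['t','w','o'] then 2
  else if t.take 4 = ['t','h','r','e','e'] then 3
  else if t.take 4 = ['f','o','u','r'] then 4
  else if t.take 4 = ['f','i','v','e'] then 5
  else if t.take 4 = ['s','i','x'] then 6
  else if t.take 4 = ['s','e','v','e','n'] then 7
  else if t.take 4 = ['e','i','g','h','t'] then 8
  else if t.take 4 = ['n','i','n','e'] then 9
  else if t.take 5 = ['z','e','r','o'] then 0
  else if t.take 5 = ['o','n','e'] then 1
  else if t.take 5 = ['t','w','o'] then 2
  else if t.take 5 = ['t','h','r','e','e'] then 3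
  else if t.take 5 = ['f','o','u','r'] then 4
  else if t.take 5 = ['f','i','v','e'] then 5
  else if t.take 5 = ['s','i','x'] then 6
  else if t.take 5 = ['s','e','v','e','n'] then 7
  else if t.take 5 = ['e','i','g','h','t'] then 8
  else if t.take 5 = ['n','i','n','e'] then 9
  else -1

theorem startswith_take (s p : String) :
    PySem.Str.startswith s p = decide (s.toList.take p.toList.length = p.toList) := by
  rw [Bool.eq_iff_iff, decide_eq_true_iff, PySem.Str.startswith_eq, PySem.Chars.startswith_iff,
    List.prefix_iff_eq_take]
  exact eq_comm

theorem numWords_mk : numWords = PySem.Dict.mk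
    [("zero", 0), ("one", 1), ("two", 2), ("three", 3), ("four", 4),
     ("five", 5), ("six", 6), ("seven", 7), ("eight", 8), ("nine", 9)] := by decide

theorem get?_numWords (s : String) : numWords.get? s =
    if "zero" = s then some 0 else if "one" = s then some 1 else
    if "two" = s then some 2 else if "three" = s then some 3 else
    if "four" = s then some 4 else if "five" = s then some 5 else
    if "six" = s then some 6 else if "seven" = s then some 7 else
    if "eight" = s then some 8 else if "nine" = s then some 9 else none := by
  rw [numWords_mk]
  simp only [PySem.Dict.get?_mk_cons, beq_iff_eq,
    show (PySem.Dict.mk ([] : List (String × Int))).get? s = none from rfl]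

theorem slice_take (tail : String) (n : Nat) :
    (PySem.Str.slice tail none (some (n : Int))).toList = tail.toList.take n := by
  simp [PySem.Str.toList_slice, PySem.Chars.slice_eq_listSlice, PySem.List.slice_to_natCast]

theorem str_eq_slice_iff (tail w : String) (n : Nat) :
    (w = PySem.Str.slice tail none (some (n : Int))) = (tail.toList.take n = w.toList) := by
  rw [eq_comm (a := w), ← String.toList_inj, slice_take]

theorem getD_ite (c : Prop) [inst : Decidable c] (a : Int) (o : Option Int) (d : Int) :
    (if c then some a else o).getD d = if c then a else o.getD d := by
  split_ifs <;> simp_all []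

theorem take_imp {t Y : List Char} {a b : Nat} (hab : a ≤ b) (h : t.take b = Y) :
    t.take a = Y.take a := by
  have := congrArg (List.take a) h
  rwa [List.take_take, Nat.min_eq_left hab] at this

theorem take_ne_of_len {t X : List Char} {n : Nat} (h : n < X.length) : t.take n ≠ X := by
  intro h2
  have := congrArg List.length h2
  simp [List.length_take] at this
  omega

theorem A_eq_core (tail : String) : pnLoop tail number_strs 0 = Acore tail.toList := by
  simp only [number_strs, pnLoop, startswith_take, Acore,
    show ("zero":String).toList = ['z','e','r','o'] from rfl,
    show ("one":String).toList = ['o','n','e'] from rfl,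
    show ("two":String).toList = ['t','w','o'] from rfl,
    show ("three":String).toList = ['t','h','r','e','e'] from rfl,
    show ("four":String).toList = ['f','o','u','r'] from rfl,
    show ("five":String).toList = ['f','i','v','e'] from rfl,
    show ("six":String).toList = ['s','i','x'] from rfl,
    show ("seven":String).toList = ['s','e','v','e','n'] from rfl,
    show ("eight":String).toList = ['e','i','g','h','t'] from rfl,
    show ("nine":String).toList = ['n','i','n','e'] from rfl]
  norm_num [decide_eq_true_iff]

theorem B_eq_core (tail : String) : pnAltLoop tail wordLens = Bcore tail.toList := by
  simp only [wordLens, pnAltLoop, get?_numWords,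
    show ((3:Int) = ((3:Nat):Int)) from rfl, show ((4:Int) = ((4:Nat):Int)) from rfl,
    show ((5:Int) = ((5:Nat):Int)) from rfl, str_eq_slice_iff, getD_ite, Option.getD_none, Bcore,
    show ("zero":String).toList = ['z','e','r','o'] from rfl,
    show ("one":String).toList = ['o','n','e'] from rfl,
    show ("two":String).toList = ['t','w','o'] from rfl,
    show ("three":String).toList = ['t','h','r','e','e'] from rfl,
    show ("four":String).toList = ['f','o','u','r'] from rfl,
    show ("five":String).toList = ['f','i','v','e'] from rfl,
    show ("six":String).toList = ['s','i','x'] from rfl,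
    show ("seven":String).toList = ['s','e','v','e','n'] from rfl,
    show ("eight":String).toList = ['e','i','g','h','t'] from rfl,
    show ("nine":String).toList = ['n','i','n','e'] from rfl]

theorem core_eq (t : List Char) : Acore t = Bcore t := by
  by_cases h0 : t.take 4 = ['z','e','r','o']
  · have e3_0 : t.take 3 = ['z','e','r'] := by simpa using take_imp (by omega) h0
    simp [Acore, Bcore, h0, e3_0]
  by_cases h1 : t.take 3 = ['o','n','e']
  · simp [Acore, Bcore, h1, h0]
  by_cases h2 : t.take 3 = ['t','w','o']
  · simp [Acore, Bcore, h2, h0]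
  by_cases h3 : t.take 5 = ['t','h','r','e','e']
  · have e3_3 : t.take 3 = ['t','h','r'] := by simpa using take_imp (by omega) h3
    have e4_3 : t.take 4 = ['t','h','r','e'] := by simpa using take_imp (by omega) h3
    simp [Acore, Bcore, h3, e3_3, e4_3]
  by_cases h4 : t.take 4 = ['f','o','u','r']
  · have e3_4 : t.take 3 = ['f','o','u'] := by simpa using take_imp (by omega) h4
    simp [Acore, Bcore, h4, e3_4, h3]
  by_cases h5 : t.take 4 = ['f','i','v','e']
  · have e3_5 : t.take 3 = ['f','i','v'] := by simpa using take_imp (by omega) h5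
    simp [Acore, Bcore, h5, e3_5, h3]
  by_cases h6 : t.take 3 = ['s','i','x']
  · simp [Acore, Bcore, h6, h0, h3, h4, h5]
  by_cases h7 : t.take 5 = ['s','e','v','e','n']
  · have e3_7 : t.take 3 = ['s','e','v'] := by simpa using take_imp (by omega) h7
    have e4_7 : t.take 4 = ['s','e','v','e'] := by simpa using take_imp (by omega) h7
    simp [Acore, Bcore, h7, e3_7, e4_7]
  by_cases h8 : t.take 5 = ['e','i','g','h','t']
  · have e3_8 : t.take 3 = ['e','i','g'] := by simpa using take_imp (by omega) h8
    have e4_8 : t.take 4 = ['e','i','g','h'] := by simpa using take_imp (by omega) h8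
    simp [Acore, Bcore, h8, e3_8, e4_8]
  by_cases h9 : t.take 4 = ['n','i','n','e']
  · have e3_9 : t.take 3 = ['n','i','n'] := by simpa using take_imp (by omega) h9
    simp [Acore, Bcore, h9, e3_9, h3, h7, h8]
  have n3_zero : t.take 3 ≠ ['z','e','r','o'] := take_ne_of_len (by norm_num)
  have n3_three : t.take 3 ≠ ['t','h','r','e','e'] := take_ne_of_len (by norm_num)
  have n3_four : t.take 3 ≠ ['f','o','u','r'] := take_ne_of_len (by norm_num)
  have n3_five : t.take 3 ≠ ['f','i','v','e'] := take_ne_of_len (by norm_num)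
  have n3_seven : t.take 3 ≠ ['s','e','v','e','n'] := take_ne_of_len (by norm_num)
  have n3_eight : t.take 3 ≠ ['e','i','g','h','t'] := take_ne_of_len (by norm_num)
  have n3_nine : t.take 3 ≠ ['n','i','n','e'] := take_ne_of_len (by norm_num)
  have n4_one : t.take 4 ≠ ['o','n','e'] := fun hx => h1 (by simpa using take_imp (by omega) hx)
  have n4_two : t.take 4 ≠ ['t','w','o'] := fun hx => h2 (by simpa using take_imp (by omega) hx)
  have n4_three : t.take 4 ≠ ['t','h','r','e','e'] := take_ne_of_len (by norm_num)
  have n4_six : t.take 4 ≠ ['s','i','x'] := fun hx => h6 (by simpa using take_imp (by omega) hx)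
  have n4_seven : t.take 4 ≠ ['s','e','v','e','n'] := take_ne_of_len (by norm_num)
  have n4_eight : t.take 4 ≠ ['e','i','g','h','t'] := take_ne_of_len (by norm_num)
  have n5_zero : t.take 5 ≠ ['z','e','r','o'] := fun hx => h0 (by simpa using take_imp (by omega) hx)
  have n5_one : t.take 5 ≠ ['o','n','e'] := fun hx => h1 (by simpa using take_imp (by omega) hx)
  have n5_two : t.take 5 ≠ ['t','w','o'] := fun hx => h2 (by simpa using take_imp (by omega) hx)
  have n5_four : t.take 5 ≠ ['f','o','u','r'] := fun hx => h4 (by simpa using take_imp (by omega) hx)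
  have n5_five : t.take 5 ≠ ['f','i','v','e'] := fun hx => h5 (by simpa using take_imp (by omega) hx)
  have n5_six : t.take 5 ≠ ['s','i','x'] := fun hx => h6 (by simpa using take_imp (by omega) hx)
  have n5_nine : t.take 5 ≠ ['n','i','n','e'] := fun hx => h9 (by simpa using take_imp (by omega) hx)
  simp [Acore, Bcore, h0, h1, h2, h3, h4, h5, h6, h7, h8, h9, n3_zero, n3_three, n3_four, n3_five, n3_seven, n3_eight, n3_nine, n4_one, n4_two, n4_three, n4_six, n4_seven, n4_eight, n5_zero, n5_one, n5_two, n5_four, n5_five, n5_six, n5_nine]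

theorem loops_eq (tail : String) : pnLoop tail number_strs 0 = pnAltLoop tail wordLens := by
  rw [A_eq_core, B_eq_core, core_eq]

-- ===== VERDICT (by name: the statement is the Claim_ definition above) =====
theorem parse_num_spec : Claim_equal_parse_num := by
  intro i c line _
  unfold Spec_parse_num parse_num parse_num_alt
  split_ifs with h
  · rfl
  · exact loops_eq _
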